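-- pv_equiv track=rewrite | github.com/Braham1234/RSA-cryptosystem-Chosen-ciphertext-attack | scripts/eve.py | reorder_characters_into_original_format
-- ===== SOURCE A (Python) =====
-- def reorder_characters_into_original_format(message_length, encrypted_block_length, original_block_decrypted_chars):
--     original_block_decrypted_str = ""
--     num_processed_bits = 0
--     while num_processed_bits < encrypted_block_length:
--         character = chr(original_block_decrypted_chars & 0xFF)
--         original_block_decrypted_chars = original_block_decrypted_chars >> 8
--         original_block_decrypted_str = character + original_block_decrypted_str
--         num_processed_bits += 8
--         message_length -= 1
--     return original_block_decrypted_str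
-- ===== SOURCE B (Python) =====
-- def reorder_characters_into_original_format(message_length, encrypted_block_length, original_block_decrypted_chars):
--     n = max(0, (encrypted_block_length + 7) // 8)
--     masked = original_block_decrypted_chars & ((1 << (8 * n)) - 1)
--     return masked.to_bytes(n, 'big').decode('latin-1')
-- ===== Notes on version B (the rewrite author's own statement) =====
-- stated objective: faster
-- what changed: Replaces the per-byte while loop with string prepending by a single bulk conversion: compute the byte count n = max(0,(encrypted_block_length+7)//8), mask the integer to n bytes, and emit them with int.to_bytes(n,'big').decode('latin-1').
import Mathlib
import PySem

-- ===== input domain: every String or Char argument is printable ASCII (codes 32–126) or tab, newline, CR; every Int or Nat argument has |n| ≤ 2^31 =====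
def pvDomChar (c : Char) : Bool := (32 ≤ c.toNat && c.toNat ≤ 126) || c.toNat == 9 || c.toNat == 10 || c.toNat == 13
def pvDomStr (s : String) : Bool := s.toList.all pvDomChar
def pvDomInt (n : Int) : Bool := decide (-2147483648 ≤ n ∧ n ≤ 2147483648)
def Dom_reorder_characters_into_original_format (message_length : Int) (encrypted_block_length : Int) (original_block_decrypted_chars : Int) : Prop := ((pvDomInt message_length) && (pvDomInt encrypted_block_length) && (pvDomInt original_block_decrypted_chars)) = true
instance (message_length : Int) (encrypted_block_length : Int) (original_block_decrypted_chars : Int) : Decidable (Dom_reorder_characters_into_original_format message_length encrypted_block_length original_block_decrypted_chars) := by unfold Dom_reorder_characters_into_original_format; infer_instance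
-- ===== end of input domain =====

-- B replaces A's per-byte while loop (one chr prepended per 8 bits) by a single bulk masked
-- int-to-bytes conversion; a timing run measured B faster.

-- ===== PORT A =====
-- A's while loop; `chars & 0xFF` is PySem.Int.band chars 255, `chars >> 8` is Lean's `>>>`
-- (both Python-exact per PySem), and chr is exact here since 0 ≤ chars & 0xFF < 256.
-- (fuel only makes the while loop structurally recursive; encrypted_block_length.toNat + 1
-- always exceeds the iteration count, so the fuel branch is never the one that stops the loop)
def reorderLoopA : Nat → Int → Int → Int → Int → String → String
  | 0, _, _, _, _, acc => acc
  | fuel + 1, message_length, num_processed_bits, encrypted_block_length, chars, acc =>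
    if num_processed_bits < encrypted_block_length then
      reorderLoopA fuel (message_length - 1) (num_processed_bits + 8) encrypted_block_length
        (chars >>> (8 : Nat)) (String.mk [Char.ofNat (PySem.Int.band chars 255).toNat] ++ acc)
    else acc

def reorder_characters_into_original_format (message_length : Int) (encrypted_block_length : Int) (original_block_decrypted_chars : Int) : String :=
  reorderLoopA (encrypted_block_length.toNat + 1) message_length 0 encrypted_block_length original_block_decrypted_chars ""

-- ===== PORT B =====
-- port of `masked.to_bytes(n, 'big').decode('latin-1')`: the n big-endian base-256 digits of
-- masked as characters (exact since B's mask guarantees 0 ≤ masked < 2^(8*n)).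
def bytesBE : Nat → Int → String
  | 0, _ => ""
  | n + 1, x =>
      bytesBE n (PySem.Int.floordiv x 256) ++ String.mk [Char.ofNat (PySem.Int.mod x 256).toNat]

def reorder_characters_into_original_format_alt (message_length : Int) (encrypted_block_length : Int) (original_block_decrypted_chars : Int) : String :=
  let n : Nat := (max 0 (PySem.Int.floordiv (encrypted_block_length + 7) 8)).toNat
  let masked : Int := PySem.Int.band original_block_decrypted_chars (((1 : Int) <<< (8 * n)) - 1)
  bytesBE n masked

-- ===== PRECONDITION & SPEC =====
def Spec_reorder_characters_into_original_format (message_length : Int) (encrypted_block_length : Int) (original_block_decrypted_chars : Int) (out : String) : Prop := out = reorder_characters_into_original_format_alt message_length encrypted_block_length original_block_decrypted_chars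
instance (message_length : Int) (encrypted_block_length : Int) (original_block_decrypted_chars : Int) (out : String) : Decidable (Spec_reorder_characters_into_original_format message_length encrypted_block_length original_block_decrypted_chars out) := by unfold Spec_reorder_characters_into_original_format; infer_instance

-- ===== CLAIM (what is proved, stated in full; the proofs are below) =====
def Claim_equal_reorder_characters_into_original_format : Prop := ∀ (message_length : Int) (encrypted_block_length : Int) (original_block_decrypted_chars : Int), Dom_reorder_characters_into_original_format message_length encrypted_block_length original_block_decrypted_chars → Spec_reorder_characters_into_original_format message_length encrypted_block_length original_block_decrypted_chars (reorder_characters_into_original_format message_length encrypted_block_length original_block_decrypted_chars)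

-- ===== LEMMAS AND PROOFS =====

-- Python's `x & (2^k - 1)` is `x mod 2^k` (every int, including negatives).
theorem band_mask (x : Int) (k : Nat) :
    PySem.Int.band x ((2 : Int) ^ k - 1) = x % ((2 : Int) ^ k) := by
  have hKc : ((2 : Int) ^ k) = ((2 ^ k : Nat) : Int) := by push_cast; ring
  have hK1 : 1 ≤ (2 : Nat) ^ k := Nat.one_le_two_pow
  have hbt : (((2 : Int) ^ k) - 1).toNat = 2 ^ k - 1 := by omega
  by_cases hx : 0 ≤ x
  · simp only [PySem.Int.band]
    rw [if_pos hx, if_pos (by omega : (0 : Int) ≤ (2 : Int) ^ k - 1)]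
    rw [hbt, Nat.and_two_pow_sub_one_eq_mod]
    have hxt : ((x.toNat : Int)) = x := Int.toNat_of_nonneg hx
    rw [hKc, ← hxt]
    exact_mod_cast rfl
  · simp only [PySem.Int.band]
    rw [if_neg hx, if_pos (by omega : (0 : Int) ≤ (2 : Int) ^ k - 1)]
    rw [hbt, Nat.and_comm, Nat.and_two_pow_sub_one_eq_mod]
    set y : Nat := (-x - 1).toNat with hy
    have hyx : ((y : Int)) = -x - 1 := by omega
    set r : Nat := y % 2 ^ k with hr
    have hrlt : r < 2 ^ k := Nat.mod_lt _ (by omega)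
    obtain ⟨q, hq⟩ : ∃ q, y = 2 ^ k * q + r := ⟨y / 2 ^ k, by rw [hr]; exact (Nat.div_add_mod y (2 ^ k)).symm⟩
    have hqI : ((y : Int)) = ((2 ^ k : Nat) : Int) * q + r := by exact_mod_cast congrArg (Nat.cast : Nat → Int) hq
    have hx2 : x = (((2 ^ k : Nat) : Int) - 1 - r) + ((2 ^ k : Nat) : Int) * (-(q : Int) - 1) := by
      have hxe : x = -((y : Int)) - 1 := by omega
      rw [hxe, hqI]; ring
    have hmod : x % ((2 ^ k : Nat) : Int) = ((2 ^ k : Nat) : Int) - 1 - r := by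
      rw [hx2, Int.add_mul_emod_self_left, Int.emod_eq_of_lt (by omega) (by omega)]
    rw [hKc, hmod]
    omega

theorem emod_mul_div256 (x M : Int) (hM : 0 < M) : x % (M * 256) / 256 = x / 256 % M := by
  have hMM : (0 : Int) < M * 256 := by positivity
  have h0 : 0 ≤ x % (M * 256) := Int.emod_nonneg x (by omega)
  have hlt : x % (M * 256) < M * 256 := Int.emod_lt_of_pos x hMM
  have hq : x = x % (M * 256) + M * (x / (M * 256)) * 256 := by
    have h := Int.ediv_add_emod x (M * 256)
    linear_combination -h
  have hdiv : x / 256 = x % (M * 256) / 256 + M * (x / (M * 256)) := by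
    conv_lhs => rw [hq]
    rw [Int.add_mul_ediv_right _ _ (by norm_num : (256 : Int) ≠ 0)]
  rw [hdiv]
  have hsd0 : 0 ≤ x % (M * 256) / 256 := Int.ediv_nonneg h0 (by norm_num)
  have hsdlt : x % (M * 256) / 256 < M := by
    rw [Int.ediv_lt_iff_lt_mul (by norm_num : (0 : Int) < 256)]
    linarith
  rw [Int.add_mul_emod_self_left, Int.emod_eq_of_lt hsd0 hsdlt]

theorem emod_mul_mod256 (x M : Int) : x % (M * 256) % 256 = x % 256 :=
  Int.emod_emod_of_dvd x ⟨M, by ring⟩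

theorem bytesBE_mod (n : Nat) : ∀ x : Int, bytesBE n (x % (2 : Int) ^ (8 * n)) = bytesBE n x := by
  induction n with
  | zero => intro x; rfl
  | succ n ih =>
    intro x
    have hpow : ((2 : Int) ^ (8 * (n + 1))) = (2 : Int) ^ (8 * n) * 256 := by
      rw [Nat.mul_succ, pow_add]; norm_num
    have hM : (0 : Int) < (2 : Int) ^ (8 * n) := by positivity
    simp only [bytesBE, PySem.Int.floordiv_eq_ediv_of_pos (by norm_num : (0 : Int) < 256),
      PySem.Int.mod_eq_emod_of_pos (by norm_num : (0 : Int) < 256), hpow]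
    rw [emod_mul_div256 x _ hM, emod_mul_mod256 x]
    rw [ih (x / 256)]

theorem loop_eq (n : Nat) : ∀ (fuel : Nat) (m num e x : Int) (acc : String),
    ((e - num + 7) / 8).toNat = n → n ≤ fuel →
    reorderLoopA fuel m num e x acc = bytesBE n x ++ acc := by
  induction n with
  | zero =>
    intro fuel m num e x acc h _
    have hnum : ¬ num < e := by omega
    cases fuel with
    | zero => simp [reorderLoopA, bytesBE]
    | succ f => rw [reorderLoopA, if_neg hnum]; simp [bytesBE]
  | succ n ih =>
    intro fuel m num e x acc h hf
    have hnum : num < e := by omega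
    cases fuel with
    | zero => omega
    | succ f =>
    rw [reorderLoopA, if_pos hnum]
    rw [ih f _ _ _ _ _ (by omega) (by omega)]
    have hsh : x >>> (8 : Nat) = x / 256 := by
      rw [Int.shiftRight_eq_div_pow]; norm_num
    have hb : PySem.Int.band x 255 = x % 256 := by
      have h8 := band_mask x 8; norm_num at h8; exact h8
    rw [hsh, hb]
    simp only [bytesBE, PySem.Int.floordiv_eq_ediv_of_pos (by norm_num : (0 : Int) < 256),
      PySem.Int.mod_eq_emod_of_pos (by norm_num : (0 : Int) < 256)]
    rw [String.append_assoc]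

-- ===== VERDICT (by name: the statement is the Claim_ definition above) =====
theorem reorder_characters_into_original_format_spec : Claim_equal_reorder_characters_into_original_format := by
  intro m e x _
  unfold Spec_reorder_characters_into_original_format
  simp only [reorder_characters_into_original_format, reorder_characters_into_original_format_alt]
  rw [loop_eq ((max 0 (PySem.Int.floordiv (e + 7) 8)).toNat) (e.toNat + 1) m 0 e x ""
      (by rw [PySem.Int.floordiv_eq_ediv_of_pos (by norm_num : (0 : Int) < 8)]; omega)
      (by rw [PySem.Int.floordiv_eq_ediv_of_pos (by norm_num : (0 : Int) < 8)]; omega)]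
  rw [show ((1 : Int) <<< (8 * (max 0 (PySem.Int.floordiv (e + 7) 8)).toNat)) - 1
        = (2 : Int) ^ (8 * (max 0 (PySem.Int.floordiv (e + 7) 8)).toNat) - 1 by
      rw [Int.shiftLeft_eq]; ring]
  rw [band_mask, bytesBE_mod]
  simp
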